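-- pv_equiv track=rewrite | github.com/S3nna13/Aurelius | src/alignment/thinking_tokens.py | count_think_tokens
-- ===== SOURCE A (Python) =====
-- THINK_START_TOKEN_ID = 200001
--
-- THINK_END_TOKEN_ID = 200002
--
-- def count_think_tokens(token_ids: list[int]) -> int:
--     """Count tokens inside thinking blocks (excludes structure tokens)."""
--     count = 0
--     inside = False
--     for tid in token_ids:
--         if tid == THINK_START_TOKEN_ID:
--             inside = True
--         elif tid == THINK_END_TOKEN_ID:
--             inside = False
--         elif inside:
--             count += 1
--     return count
-- ===== SOURCE B (Python) =====
-- THINK_START_TOKEN_ID = 200001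
--
-- THINK_END_TOKEN_ID = 200002
--
-- def count_think_tokens(token_ids: list[int]) -> int:
--     """Count tokens inside thinking blocks via an explicit span scan."""
--     count = 0
--     i = 0
--     n = len(token_ids)
--     while i < n:
--         if token_ids[i] == THINK_START_TOKEN_ID:
--             # scan the span until its closing END (or the end of the list)
--             j = i + 1
--             while j < n and token_ids[j] != THINK_END_TOKEN_ID:
--                 if token_ids[j] != THINK_START_TOKEN_ID:
--                     count += 1
--                 j += 1
--             i = j + 1
--         else:
--             i += 1
--     return count
-- ===== Notes on version B (the rewrite author's own statement) =====
-- stated objective: alternative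
-- what changed: Replaced the boolean inside-flag toggle over every element by a two-phase span scan that, on each THINK_START, runs an inner pointer to the matching THINK_END and counts non-marker tokens in that span.
import Mathlib
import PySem

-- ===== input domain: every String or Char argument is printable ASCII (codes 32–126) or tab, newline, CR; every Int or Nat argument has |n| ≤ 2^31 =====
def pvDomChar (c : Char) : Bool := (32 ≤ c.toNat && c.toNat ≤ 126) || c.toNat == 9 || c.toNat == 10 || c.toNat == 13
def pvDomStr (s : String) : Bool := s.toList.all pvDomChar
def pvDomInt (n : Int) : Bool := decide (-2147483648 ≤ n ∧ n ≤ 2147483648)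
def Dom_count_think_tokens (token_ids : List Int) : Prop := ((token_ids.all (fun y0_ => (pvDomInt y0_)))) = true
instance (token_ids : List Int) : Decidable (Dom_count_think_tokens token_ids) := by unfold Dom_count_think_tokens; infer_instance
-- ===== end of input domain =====

-- B replaces A's per-element inside-flag toggle by a two-phase span scan (outer scan + inner span counter); same cost, different decomposition.

-- ===== PORT A =====
-- A: single pass keeping (count, inside) state, one branch per element.
def count_think_tokens (token_ids : List Int) : Int :=
  (token_ids.foldl
    (fun (s : Int × Bool) tid =>
      if tid = 200001 then (s.1, true)
      else if tid = 200002 then (s.1, false)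
      else if s.2 then (s.1 + 1, s.2) else s)
    (0, false)).1

-- ===== PORT B =====
-- B: outer scan looks for THINK_START; the inner span scan counts non-marker
-- tokens until the closing THINK_END, then hands control back to the outer scan.
mutual
  def pvOuterScan : List Int → Int
    | [] => 0
    | t :: rest => if t = 200001 then pvInnerSpan rest else pvOuterScan rest
  def pvInnerSpan : List Int → Int
    | [] => 0
    | t :: rest =>
        if t = 200002 then pvOuterScan rest
        else if t = 200001 then pvInnerSpan rest
        else 1 + pvInnerSpan rest
end

def count_think_tokens_alt (token_ids : List Int) : Int :=
  pvOuterScan token_ids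

-- ===== PRECONDITION & SPEC =====
def Spec_count_think_tokens (token_ids : List Int) (out : Int) : Prop := out = count_think_tokens_alt token_ids
instance (token_ids : List Int) (out : Int) : Decidable (Spec_count_think_tokens token_ids out) := by unfold Spec_count_think_tokens; infer_instance

-- ===== CLAIM (what is proved, stated in full; the proofs are below) =====
def Claim_equal_count_think_tokens : Prop := ∀ (token_ids : List Int), Dom_count_think_tokens token_ids → Spec_count_think_tokens token_ids (count_think_tokens token_ids)

-- ===== LEMMAS AND PROOFS =====

-- Invariant: A's fold from state (c, inside) yields c plus the span-scan count
-- of the remaining list, in the phase corresponding to the flag.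
theorem pv_fold_eq (ts : List Int) : ∀ c : Int,
    (ts.foldl
      (fun (s : Int × Bool) tid =>
        if tid = 200001 then (s.1, true)
        else if tid = 200002 then (s.1, false)
        else if s.2 then (s.1 + 1, s.2) else s)
      (c, false)).1 = c + pvOuterScan ts
    ∧
    (ts.foldl
      (fun (s : Int × Bool) tid =>
        if tid = 200001 then (s.1, true)
        else if tid = 200002 then (s.1, false)
        else if s.2 then (s.1 + 1, s.2) else s)
      (c, true)).1 = c + pvInnerSpan ts := by
  induction ts with
  | nil => intro c; simp [pvOuterScan, pvInnerSpan]
  | cons t rest ih =>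
      intro c
      by_cases h1 : t = 200001
      · simp [h1, pvOuterScan, pvInnerSpan, List.foldl, (ih c).2]
      · by_cases h2 : t = 200002
        · simp [h2, pvOuterScan, pvInnerSpan, List.foldl, (ih c).1]
        · constructor
          · simp [h1, h2, pvOuterScan, List.foldl, (ih c).1]
          · simp [h1, h2, pvInnerSpan, List.foldl, (ih (c + 1)).2]; ring

-- ===== VERDICT (by name: the statement is the Claim_ definition above) =====
theorem count_think_tokens_spec : Claim_equal_count_think_tokens := by
  intro ts _
  unfold Spec_count_think_tokens count_think_tokens count_think_tokens_alt
  have := (pv_fold_eq ts 0).1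
  simpa using this
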